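-- pv_equiv track=rewrite | github.com/pypi-data/pypi-mirror-404 | packages/dev-health-ops/dev_health_ops-0.4.0-py3-none-any.whl/dev_health_ops/audit/schema.py | _extract_type_segment
-- ===== SOURCE A (Python) =====
-- _STOP_KEYWORDS = {
--     "DEFAULT",
--     "CODEC",
--     "MATERIALIZED",
--     "ALIAS",
--     "COMMENT",
--     "TTL",
-- }
--
-- def _extract_type_segment(value: str) -> str:
--     depth = 0
--     for idx, ch in enumerate(value):
--         if ch == "(":
--             depth += 1
--         elif ch == ")":
--             depth = max(0, depth - 1)
--         elif depth == 0 and ch.isspace():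
--             remainder = value[idx:].lstrip()
--             token = remainder.split(None, 1)[0].upper() if remainder else ""
--             if token in _STOP_KEYWORDS:
--                 return value[:idx].strip()
--     return value.strip()
-- ===== SOURCE B (Python) =====
-- _STOP_KEYWORDS = {
--     "DEFAULT",
--     "CODEC",
--     "MATERIALIZED",
--     "ALIAS",
--     "COMMENT",
--     "TTL",
-- }
--
--
-- def _runs(value):
--     # Stage 1: segment the string into maximal runs of whitespace /
--     # non-whitespace characters, as (start_index, text) pairs.
--     out = []
--     i = 0
--     n = len(value)
--     while i < n:
--         j = i + 1
--         while j < n and value[j].isspace() == value[i].isspace():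
--             j += 1
--         out.append((i, value[i:j]))
--         i = j
--     return out
--
--
-- def _paren_depth(depth, text):
--     # Fold the paren depth update over one token.
--     for ch in text:
--         if ch == "(":
--             depth += 1
--         elif ch == ")":
--             depth = max(0, depth - 1)
--     return depth
--
--
-- def _extract_type_segment(value: str) -> str:
--     # Stage 2: walk the run list; at each whitespace run seen at paren depth 0,
--     # the candidate token is simply the following run.
--     runs = _runs(value)
--     depth = 0
--     for k, (start, text) in enumerate(runs):
--         if text[0].isspace():
--             nxt = runs[k + 1][1] if k + 1 < len(runs) else ""
--             if depth == 0 and nxt.upper() in _STOP_KEYWORDS: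
--                 return value[:start].strip()
--         else:
--             depth = _paren_depth(depth, text)
--     return value.strip()
-- ===== Notes on version B (the rewrite author's own statement) =====
-- stated objective: alternative
-- what changed: A is a fused per-character scan that re-slices, lstrips and splits the whole remainder at every depth-0 whitespace character; B is staged: it first segments the string into maximal whitespace/non-whitespace runs, then walks the run list folding the paren depth per token, reading the candidate token directly as the run following each depth-0 whitespace run.
import Mathlib
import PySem

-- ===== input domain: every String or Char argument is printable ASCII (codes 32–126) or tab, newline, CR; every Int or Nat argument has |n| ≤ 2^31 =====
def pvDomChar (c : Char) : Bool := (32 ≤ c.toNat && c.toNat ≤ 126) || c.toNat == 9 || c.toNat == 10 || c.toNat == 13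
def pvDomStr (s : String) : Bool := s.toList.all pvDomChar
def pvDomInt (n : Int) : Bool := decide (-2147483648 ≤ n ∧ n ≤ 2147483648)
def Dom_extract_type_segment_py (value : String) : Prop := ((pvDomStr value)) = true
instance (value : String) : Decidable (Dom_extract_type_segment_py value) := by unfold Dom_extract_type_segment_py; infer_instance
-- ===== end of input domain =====

-- B replaces A's fused per-character scan (which re-slices and lstrips the whole remainder at
-- every depth-0 whitespace character) by a staged algorithm: first segment the string into
-- maximal whitespace/non-whitespace runs, then walk the run list folding the paren depth per
-- token, reading the candidate token directly as the run after each depth-0 whitespace run.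

def pvStops : List (List Char) :=
  ["DEFAULT".toList, "CODEC".toList, "MATERIALIZED".toList, "ALIAS".toList, "COMMENT".toList, "TTL".toList]

-- ===== PORT A =====
def pvAGo (full : List Char) : List Char → Nat → Int → List Char
  | [], _, _ => PySem.Chars.strip full
  | c :: rest, idx, depth =>
    if c = '(' then pvAGo full rest (idx + 1) (depth + 1)
    else if c = ')' then pvAGo full rest (idx + 1) (max 0 (depth - 1))
    else if depth = 0 ∧ PySem.Chars.isspace c = true then
      let remainder := PySem.Chars.lstrip (List.drop idx full)
      let token := if remainder ≠ [] then PySem.Chars.upper ((PySem.Chars.split₀Max remainder 1).headD []) else []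
      if pvStops.contains token then PySem.Chars.strip (List.take idx full)
      else pvAGo full rest (idx + 1) depth
    else pvAGo full rest (idx + 1) depth

def extract_type_segment_py (value : String) : String :=
  String.ofList (pvAGo value.toList value.toList 0 0)

-- ===== PORT B =====
-- _runs: maximal runs of whitespace / non-whitespace characters, with start indices
def pvRuns : List Char → Nat → List (Nat × List Char)
  | [], _ => []
  | c :: rest, i =>
    let seg := c :: rest.takeWhile (fun d => PySem.Chars.isspace d == PySem.Chars.isspace c)
    (i, seg) :: pvRuns (rest.dropWhile (fun d => PySem.Chars.isspace d == PySem.Chars.isspace c)) (i + seg.length)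
  termination_by cs _ => cs.length
  decreasing_by
    simp only [List.length_cons]
    exact Nat.lt_succ_of_le (List.length_dropWhile_le _ _)

-- _paren_depth: fold the depth update over one token
def pvParenDepth (depth : Int) (text : List Char) : Int :=
  text.foldl (fun d ch => if ch = '(' then d + 1 else if ch = ')' then max 0 (d - 1) else d) depth

-- the main run-list walk (runs are never empty, so Python's text[0] is text.headD ' ')
def pvBLoop (full : List Char) : List (Nat × List Char) → Int → List Char
  | [], _ => PySem.Chars.strip full
  | (start, text) :: rest, depth =>
    if PySem.Chars.isspace (text.headD ' ') = true then
      let nxt := match rest with | (_, t) :: _ => t | [] => ([] : List Char)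
      if depth = 0 ∧ pvStops.contains (PySem.Chars.upper nxt) = true then PySem.Chars.strip (List.take start full)
      else pvBLoop full rest depth
    else pvBLoop full rest (pvParenDepth depth text)

def extract_type_segment_py_alt (value : String) : String :=
  String.ofList (pvBLoop value.toList (pvRuns value.toList 0) 0)

-- ===== PRECONDITION & SPEC =====
def Spec_extract_type_segment_py (value : String) (out : String) : Prop := out = extract_type_segment_py_alt value
instance (value : String) (out : String) : Decidable (Spec_extract_type_segment_py value out) := by unfold Spec_extract_type_segment_py; infer_instance

-- ===== CLAIM (what is proved, stated in full; the proofs are below) =====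
def Claim_equal_extract_type_segment_py : Prop := ∀ (value : String), Dom_extract_type_segment_py value → Spec_extract_type_segment_py value (extract_type_segment_py value)

-- ===== LEMMAS AND PROOFS =====
theorem pv_go_headD (fuel : Nat) : ∀ (m : Nat) (l : List Char) (acc : List (List Char)) (x : List Char),
    (PySem.Chars.split₀Max.go fuel m l (acc ++ [x])).headD [] = x := by
  induction fuel with
  | zero => intro m l acc x; simp [PySem.Chars.split₀Max.go]
  | succ fuel ih =>
    intro m l acc x
    rw [PySem.Chars.split₀Max.go]
    cases h : List.dropWhile PySem.Chars.isspace l with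
    | nil => simp
    | cons a b =>
      by_cases hm : m = 0
      · simp [hm]
      · simp only [hm, if_false]
        exact ih (m-1) _ (_ :: acc) x

theorem pv_headD_split₀Max_one (r : List Char) (h : List.dropWhile PySem.Chars.isspace r = r)
    (hne : r ≠ []) :
    (PySem.Chars.split₀Max r 1).headD [] = r.takeWhile (fun d => !PySem.Chars.isspace d) := by
  rw [PySem.Chars.split₀Max]
  simp only [show ¬((1:Int) < 0) by norm_num, if_false]
  rw [show r.length + 1 = Nat.succ r.length from rfl, PySem.Chars.split₀Max.go]
  rw [h]
  cases r with
  | nil => exact absurd rfl hne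
  | cons a b =>
    simp only [Int.toNat_one, Nat.one_ne_zero, if_false]
    exact pv_go_headD _ _ _ [] _

theorem pv_token_eq (cs : List Char) :
    (if PySem.Chars.lstrip cs ≠ [] then
        PySem.Chars.upper ((PySem.Chars.split₀Max (PySem.Chars.lstrip cs) 1).headD []) else []) =
      PySem.Chars.upper ((cs.dropWhile PySem.Chars.isspace).takeWhile (fun d => !PySem.Chars.isspace d)) := by
  simp only [PySem.Chars.lstrip]
  by_cases h : List.dropWhile PySem.Chars.isspace cs = []
  · simp [h, PySem.Chars.upper]
  · rw [if_pos h, pv_headD_split₀Max_one _ (List.dropWhile_idempotent _ _) h]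

theorem pv_aGo_run (full : List Char) (cs : List Char) (idx : Nat) (hcs : cs = full.drop idx)
    (htok : pvStops.contains
      (PySem.Chars.upper ((cs.dropWhile PySem.Chars.isspace).takeWhile (fun d => !PySem.Chars.isspace d))) = false) :
    pvAGo full cs idx 0 = pvAGo full (cs.dropWhile PySem.Chars.isspace) (idx + (cs.takeWhile PySem.Chars.isspace).length) 0 := by
  induction cs generalizing idx with
  | nil => simp
  | cons c rest ih =>
    cases hsp : PySem.Chars.isspace c with
    | false => simp [List.dropWhile_cons, hsp]
    | true =>
      have h1 : c ≠ '(' := by rintro rfl; simp [PySem.Chars.isspace] at hsp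
      have h2 : c ≠ ')' := by rintro rfl; simp [PySem.Chars.isspace] at hsp
      have hrest : rest = full.drop (idx + 1) := by
        rw [← List.drop_drop, ← hcs]; rfl
      have hdw : List.dropWhile PySem.Chars.isspace (c :: rest) = List.dropWhile PySem.Chars.isspace rest := by
        rw [List.dropWhile_cons, if_pos hsp]
      have htw : List.takeWhile PySem.Chars.isspace (c :: rest) = c :: List.takeWhile PySem.Chars.isspace rest := by
        rw [List.takeWhile_cons, if_pos hsp]
      rw [hdw] at htok
      conv_lhs => rw [pvAGo]
      rw [if_neg h1, if_neg h2, if_pos ⟨rfl, hsp⟩]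
      dsimp only
      rw [← hcs, pv_token_eq, hdw, if_neg (by simpa using htok), ih (idx + 1) hrest htok, htw]
      congr 1
      simp only [List.length_cons]
      omega

-- a non-space run is consumed by A folding the depth update over it
theorem pv_aGo_token (full : List Char) (t : List Char) (rest' : List Char) (idx : Nat) (depth : Int)
    (ht : ∀ c ∈ t, PySem.Chars.isspace c = false) :
    pvAGo full (t ++ rest') idx depth = pvAGo full rest' (idx + t.length) (pvParenDepth depth t) := by
  induction t generalizing idx depth with
  | nil => simp [pvParenDepth]
  | cons c t ih =>
    have hc := ht c (List.mem_cons_self ..)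
    have ht' : ∀ c ∈ t, PySem.Chars.isspace c = false := fun d hd => ht d (List.mem_cons_of_mem _ hd)
    rw [List.cons_append, pvAGo]
    have hns : ¬ (depth = 0 ∧ PySem.Chars.isspace c = true) := by
      rintro ⟨_, h⟩; rw [hc] at h; exact Bool.false_ne_true h
    by_cases h1 : c = '('
    · rw [if_pos h1, ih _ _ ht']
      simp only [pvParenDepth, List.foldl_cons, h1, if_pos rfl, List.length_cons]
      congr 1; omega
    by_cases h2 : c = ')'
    · rw [if_neg h1, if_pos h2, ih _ _ ht']
      subst h2
      have hstep : pvParenDepth depth (')' :: t) = pvParenDepth (max 0 (depth - 1)) t := by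
        simp [pvParenDepth]
      rw [hstep]
      congr 1
      simp only [List.length_cons]; omega
    · rw [if_neg h1, if_neg h2, if_neg hns, ih _ _ ht']
      simp only [pvParenDepth, List.foldl_cons, if_neg h1, if_neg h2, List.length_cons]
      congr 1; omega

-- a space run at non-zero depth is consumed by A with depth unchanged
theorem pv_aGo_space_pos (full : List Char) (s : List Char) (rest' : List Char) (idx : Nat) (depth : Int)
    (hs : ∀ c ∈ s, PySem.Chars.isspace c = true) (hd : depth ≠ 0) :
    pvAGo full (s ++ rest') idx depth = pvAGo full rest' (idx + s.length) depth := by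
  induction s generalizing idx with
  | nil => simp
  | cons c s ih =>
    have hc := hs c (List.mem_cons_self ..)
    have hs' : ∀ c ∈ s, PySem.Chars.isspace c = true := fun d hd => hs d (List.mem_cons_of_mem _ hd)
    have h1 : c ≠ '(' := by rintro rfl; simp [PySem.Chars.isspace] at hc
    have h2 : c ≠ ')' := by rintro rfl; simp [PySem.Chars.isspace] at hc
    rw [List.cons_append, pvAGo, if_neg h1, if_neg h2, if_neg (by rintro ⟨h, _⟩; exact hd h),
      ih _ hs']
    congr 1
    simp only [List.length_cons]; omega

theorem pv_parenDepth_nonneg (t : List Char) (depth : Int) (hd : 0 ≤ depth) :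
    0 ≤ pvParenDepth depth t := by
  induction t generalizing depth with
  | nil => exact hd
  | cons c t ih =>
    simp only [pvParenDepth, List.foldl_cons] at *
    split_ifs <;> apply ih <;> omega

theorem pv_head_dropWhile {α : Type} (p : α → Bool) :
    ∀ (l : List α) (d : α) (r : List α), l.dropWhile p = d :: r → p d = false := by
  intro l
  induction l with
  | nil => intro d r h; simp at h
  | cons a l ih =>
    intro d r h
    rw [List.dropWhile_cons] at h
    by_cases ha : p a = true
    · rw [if_pos ha] at h; exact ih d r h
    · rw [if_neg ha] at h
      cases h
      exact Bool.not_eq_true _ ▸ (by simpa using ha)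

theorem pv_takeWhile_all {α : Type} (p : α → Bool) (s : List α) (r : List α)
    (hs : ∀ c ∈ s, p c = true) (hr : ∀ d r', r = d :: r' → p d = false) :
    (s ++ r).takeWhile p = s ∧ (s ++ r).dropWhile p = r := by
  induction s with
  | nil =>
    cases r with
    | nil => simp
    | cons c r' => simp [List.takeWhile_cons, List.dropWhile_cons, hr c r' rfl]
  | cons a s ih =>
    have h2 := ih (fun c hc => hs c (List.mem_cons_of_mem _ hc))
    simp [List.takeWhile_cons, List.dropWhile_cons, hs a (List.mem_cons_self ..), h2.1, h2.2]

theorem pvRuns_cons (c : Char) (rest : List Char) (i : Nat) :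
    pvRuns (c :: rest) i =
      (i, c :: rest.takeWhile (fun d => PySem.Chars.isspace d == PySem.Chars.isspace c)) ::
        pvRuns (rest.dropWhile (fun d => PySem.Chars.isspace d == PySem.Chars.isspace c))
          (i + (c :: rest.takeWhile (fun d => PySem.Chars.isspace d == PySem.Chars.isspace c)).length) := by
  rw [pvRuns]

theorem pvBLoop_cons (full : List Char) (start : Nat) (text : List Char)
    (rest : List (Nat × List Char)) (depth : Int) :
    pvBLoop full ((start, text) :: rest) depth =
      if PySem.Chars.isspace (text.headD ' ') = true then
        if depth = 0 ∧ pvStops.contains (PySem.Chars.upper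
            (match rest with | (_, t) :: _ => t | [] => ([] : List Char))) = true then
          PySem.Chars.strip (List.take start full)
        else pvBLoop full rest depth
      else pvBLoop full rest (pvParenDepth depth text) := by
  rw [pvBLoop.eq_def]

theorem pv_main (full : List Char) : ∀ (n : Nat) (cs : List Char) (i : Nat) (depth : Int),
    cs.length ≤ n → cs = full.drop i → 0 ≤ depth →
    pvAGo full cs i depth = pvBLoop full (pvRuns cs i) depth := by
  intro n
  induction n with
  | zero =>
    intro cs i depth hlen _ _
    rw [List.length_eq_zero_iff.mp (Nat.le_zero.mp hlen)]
    rw [pvAGo, pvRuns, pvBLoop]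
  | succ n ih =>
    intro cs i depth hlen hcs hd
    cases cs with
    | nil => rw [pvAGo, pvRuns, pvBLoop]
    | cons c rest =>
      rw [pvRuns_cons]
      set p : Char → Bool := fun d => PySem.Chars.isspace d == PySem.Chars.isspace c with hp
      set seg : List Char := c :: rest.takeWhile p with hseg
      set rest2 : List Char := rest.dropWhile p with hrest2
      have hsplit : c :: rest = seg ++ rest2 := by
        rw [hseg, hrest2, List.cons_append, List.takeWhile_append_dropWhile]
      have hseg_all : ∀ d ∈ seg, PySem.Chars.isspace d = PySem.Chars.isspace c := by
        intro d hdm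
        rcases List.mem_cons.mp hdm with h | h
        · rw [h]
        · have := List.mem_takeWhile_imp h
          simpa [hp] using this
      have hrest2_head : ∀ d r', rest2 = d :: r' → PySem.Chars.isspace d ≠ PySem.Chars.isspace c := by
        intro d r' hdm
        have := pv_head_dropWhile p rest d r' (by rw [← hrest2]; exact hdm)
        simpa [hp] using this
      have hrest2_drop : rest2 = full.drop (i + seg.length) := by
        have h1 : rest2 = (c :: rest).drop seg.length := by
          rw [hsplit]; simp
        rw [h1, hcs, List.drop_drop]
        try congr 1
        try omega
      have hrest2_len : rest2.length ≤ n := by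
        have ha : rest2.length ≤ rest.length := List.length_dropWhile_le _ _
        have hb : rest.length ≤ n := by simpa using hlen
        omega
      rw [pvBLoop_cons]
      cases hsp : PySem.Chars.isspace c with
      | false =>
        -- token run: A folds the depth over seg, B takes the non-space branch
        have hheadD : PySem.Chars.isspace (seg.headD ' ') = false := by
          rw [hseg]; simpa using hsp
        rw [if_neg (by simpa using hheadD)]
        have hseg_ns : ∀ d ∈ seg, PySem.Chars.isspace d = false := fun d hdm => by
          rw [hseg_all d hdm, hsp]
        calc pvAGo full (c :: rest) i depth
            = pvAGo full (seg ++ rest2) i depth := by rw [← hsplit]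
          _ = pvAGo full rest2 (i + seg.length) (pvParenDepth depth seg) :=
              pv_aGo_token full seg rest2 i depth hseg_ns
          _ = pvBLoop full (pvRuns rest2 (i + seg.length)) (pvParenDepth depth seg) :=
              ih rest2 (i + seg.length) _ hrest2_len hrest2_drop (pv_parenDepth_nonneg _ _ hd)
      | true =>
        have hheadD : PySem.Chars.isspace (seg.headD ' ') = true := by
          rw [hseg]; simpa using hsp
        rw [if_pos hheadD]
        have hseg_sp : ∀ d ∈ seg, PySem.Chars.isspace d = true := fun d hdm => by
          rw [hseg_all d hdm, hsp]
        have hr2ns : ∀ d r', rest2 = d :: r' → PySem.Chars.isspace d = false := by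
          intro d r' hdm
          have hne := hrest2_head d r' hdm
          cases h : PySem.Chars.isspace d
          · rfl
          · rw [hsp] at hne; exact absurd h hne
        obtain ⟨htw, hdw⟩ := pv_takeWhile_all PySem.Chars.isspace seg rest2 hseg_sp hr2ns
        -- the token A extracts is exactly the next run of B
        have hnxt : (match pvRuns rest2 (i + seg.length) with
            | (_, t) :: _ => t | [] => ([] : List Char)) =
            rest2.takeWhile (fun d => !PySem.Chars.isspace d) := by
          cases h2 : rest2 with
          | nil => rw [pvRuns]; rfl
          | cons c2 r2 =>
            have hc2 : PySem.Chars.isspace c2 = false := hr2ns c2 r2 h2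
            have hfun : (fun d => PySem.Chars.isspace d == PySem.Chars.isspace c2) =
                (fun d => !PySem.Chars.isspace d) := by
              funext d; rw [hc2]; cases PySem.Chars.isspace d <;> rfl
            rw [pvRuns_cons]
            simp [hfun, List.takeWhile_cons, hc2]
        have h1 : c ≠ '(' := by rintro rfl; simp [PySem.Chars.isspace] at hsp
        have h2 : c ≠ ')' := by rintro rfl; simp [PySem.Chars.isspace] at hsp
        have hdwcs : List.dropWhile PySem.Chars.isspace (c :: rest) = rest2 := by
          rw [hsplit, hdw]
        have htwcs : List.takeWhile PySem.Chars.isspace (c :: rest) = seg := by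
          rw [hsplit, htw]
        by_cases hdz : depth = 0
        · subst hdz
          by_cases hcont : pvStops.contains
              (PySem.Chars.upper (rest2.takeWhile (fun d => !PySem.Chars.isspace d))) = true
          · -- stop keyword: both return strip (take i full)
            rw [if_pos ⟨rfl, by rw [hnxt]; exact hcont⟩]
            rw [pvAGo, if_neg h1, if_neg h2, if_pos ⟨rfl, hsp⟩]
            dsimp only
            rw [← hcs, pv_token_eq, hdwcs, if_pos hcont]
          · -- not a stop keyword: A jumps past the whole space run
            rw [if_neg (by rintro ⟨_, hcn⟩; rw [hnxt] at hcn; exact hcont hcn)]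
            have hcont' : pvStops.contains
                (PySem.Chars.upper (((c :: rest).dropWhile PySem.Chars.isspace).takeWhile
                  (fun d => !PySem.Chars.isspace d))) = false := by
              rw [hdwcs]
              exact Bool.not_eq_true _ ▸ (by simpa using hcont)
            rw [pv_aGo_run full (c :: rest) i hcs hcont', hdwcs, htwcs]
            exact ih rest2 (i + seg.length) 0 hrest2_len hrest2_drop le_rfl
        · -- depth ≠ 0: A consumes the space run keeping depth
          rw [if_neg (by rintro ⟨h, _⟩; exact hdz h)]
          calc pvAGo full (c :: rest) i depth
              = pvAGo full (seg ++ rest2) i depth := by rw [← hsplit]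
            _ = pvAGo full rest2 (i + seg.length) depth :=
                pv_aGo_space_pos full seg rest2 i depth hseg_sp hdz
            _ = pvBLoop full (pvRuns rest2 (i + seg.length)) depth :=
                ih rest2 (i + seg.length) depth hrest2_len hrest2_drop hd

-- ===== VERDICT (by name: the statement is the Claim_ definition above) =====
theorem extract_type_segment_py_spec : Claim_equal_extract_type_segment_py := by
  intro value _
  unfold Spec_extract_type_segment_py extract_type_segment_py extract_type_segment_py_alt
  rw [pv_main value.toList value.toList.length value.toList 0 0 le_rfl (by simp) le_rfl]
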